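-- pv_equiv track=rewrite | github.com/julektaraz/rag-kit | python-service/pipeline/multi_file_context.py | get_related_files
-- ===== SOURCE A (Python) =====
-- from typing import List, Dict, Set, Optional
--
-- def get_related_files(
--     file_path: str,
--     file_graph: Dict[str, Set[str]],
--     max_depth: int = 2,
-- ) -> Set[str]:
--     """
--     Get files related to a given file through imports/references.
--
--     Args:
--         file_path: Starting file path
--         file_graph: File relationship graph
--         max_depth: Maximum depth to traverse
--
--     Returns:
--         Set of related file paths
--     """
--     related = set()
--     visited = set()
--
--     def traverse(current_file: str, depth: int):
--         if depth > max_depth or current_file in visited: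
--             return
--
--         visited.add(current_file)
--         related.add(current_file)
--
--         # Get directly related files
--         for related_file in file_graph.get(current_file, set()):
--             traverse(related_file, depth + 1)
--
--     traverse(file_path, 0)
--     return related
-- ===== SOURCE B (Python) =====
-- from typing import Dict, Set
--
-- def get_related_files(
--     file_path: str,
--     file_graph: Dict[str, Set[str]],
--     max_depth: int = 2,
-- ) -> Set[str]:
--     # Iterative DFS with an explicit stack; a single set serves as both
--     # 'visited' and the result (A always adds to both together).
--     related = set()
--     stack = [(file_path, 0)]
--     while stack:
--         current, depth = stack.pop()
--         if depth > max_depth or current in related: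
--             continue
--         related.add(current)
--         # push neighbors reversed so that pop() yields them in original order
--         for n in reversed(list(file_graph.get(current, ()))):
--             stack.append((n, depth + 1))
--     return related
-- ===== Notes on version B (the rewrite author's own statement) =====
-- stated objective: alternative
-- what changed: The recursive closure-based traversal is replaced by an iterative DFS with an explicit stack of (file, depth) pairs, and the redundant separate 'visited' set is dropped (a single set serves as visited and result).
import Mathlib
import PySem

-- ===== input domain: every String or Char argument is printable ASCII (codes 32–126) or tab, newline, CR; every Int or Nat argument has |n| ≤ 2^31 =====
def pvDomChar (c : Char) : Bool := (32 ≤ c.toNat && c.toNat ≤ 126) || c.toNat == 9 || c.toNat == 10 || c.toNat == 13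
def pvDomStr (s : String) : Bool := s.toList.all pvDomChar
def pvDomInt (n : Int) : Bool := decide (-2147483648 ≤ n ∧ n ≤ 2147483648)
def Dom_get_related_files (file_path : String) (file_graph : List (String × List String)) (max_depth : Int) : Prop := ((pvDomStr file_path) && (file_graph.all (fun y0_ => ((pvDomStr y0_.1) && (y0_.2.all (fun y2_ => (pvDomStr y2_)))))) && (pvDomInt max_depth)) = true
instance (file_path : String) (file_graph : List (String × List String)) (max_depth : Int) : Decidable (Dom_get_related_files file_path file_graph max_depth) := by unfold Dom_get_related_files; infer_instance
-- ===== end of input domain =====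

-- B changes only the decomposition: A's recursive closure becomes an explicit-stack
-- iterative DFS that keeps a single set (visited = related in A); same cost, no speed claim.

-- `file_graph.get(current, set())` — first-match association-list lookup with default []
def nbrs (file_graph : List (String × List String)) (c : String) : List String :=
  (PySem.Dict.mk file_graph).getD c []

-- ===== PORT A =====
-- A's `traverse(current, depth)` recursion. The fuel argument is exactly the remaining
-- depth budget (max_depth + 1 - depth).toNat, so fuel 0 IS the guard `depth > max_depth`;
-- the for-loop over neighbours is the mutual helper travList.
mutual
def travA (file_graph : List (String × List String)) :
    Nat → String → (PySem.Set String × PySem.Set String) → (PySem.Set String × PySem.Set String)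
  | 0, _, st => st                                   -- depth > max_depth: return
  | Nat.succ f, c, st =>
    if c ∈ st.1 then st                              -- current_file in visited: return
    else travList file_graph f (nbrs file_graph c)
           (PySem.Set.add st.1 c, PySem.Set.add st.2 c)   -- visited.add; related.add
def travList (file_graph : List (String × List String)) :
    Nat → List String → (PySem.Set String × PySem.Set String) → (PySem.Set String × PySem.Set String)
  | _, [], st => st
  | f, n :: ns, st => travList file_graph f ns (travA file_graph f n st)
end

def get_related_files (file_path : String) (file_graph : List (String × List String)) (max_depth : Int) : List String :=
  (travA file_graph (max_depth + 1).toNat file_path (PySem.Set.empty, PySem.Set.empty)).2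

-- ===== PORT B =====
-- Source B's `while stack:` loop; the Lean list's head is the Python stack's top (Source B pushes
-- the neighbours reversed and pops from the end, which is consing them in order here).
-- The Nat fuel is only a termination device; 1 + Σ|neighbour lists| iterations always suffice.
def loopB (file_graph : List (String × List String)) (max_depth : Int) :
    Nat → List (String × Int) → PySem.Set String → PySem.Set String
  | 0, _, related => related
  | _ + 1, [], related => related
  | f + 1, (c, d) :: rest, related =>
    if d > max_depth ∨ c ∈ related then loopB file_graph max_depth f rest related
    else loopB file_graph max_depth f
           ((nbrs file_graph c).map (fun n => (n, d + 1)) ++ rest)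
           (PySem.Set.add related c)

def get_related_files_alt (file_path : String) (file_graph : List (String × List String)) (max_depth : Int) : List String :=
  loopB file_graph max_depth (1 + (file_graph.map (fun kv => kv.2.length)).sum)
    [(file_path, 0)] PySem.Set.empty

-- ===== PRECONDITION & SPEC =====
def Spec_get_related_files (file_path : String) (file_graph : List (String × List String)) (max_depth : Int) (out : List String) : Prop := out = get_related_files_alt file_path file_graph max_depth
instance (file_path : String) (file_graph : List (String × List String)) (max_depth : Int) (out : List String) : Decidable (Spec_get_related_files file_path file_graph max_depth out) := by unfold Spec_get_related_files; infer_instance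

-- ===== CLAIM (what is proved, stated in full; the proofs are below) =====
def Claim_equal_get_related_files : Prop := ∀ (file_path : String) (file_graph : List (String × List String)) (max_depth : Int), Dom_get_related_files file_path file_graph max_depth → Spec_get_related_files file_path file_graph max_depth (get_related_files file_path file_graph max_depth)

-- ===== LEMMAS AND PROOFS =====

-- exact number of loop iterations B spends to process (c, depth) / a pushed neighbour block
mutual
def costA (file_graph : List (String × List String)) :
    Nat → String → (PySem.Set String × PySem.Set String) → Nat
  | 0, _, _ => 1
  | Nat.succ f, c, st =>
    if c ∈ st.1 then 1
    else 1 + costList file_graph f (nbrs file_graph c) (PySem.Set.add st.1 c, PySem.Set.add st.2 c)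
def costList (file_graph : List (String × List String)) :
    Nat → List String → (PySem.Set String × PySem.Set String) → Nat
  | _, [], _ => 0
  | f, n :: ns, st => costA file_graph f n st + costList file_graph f ns (travA file_graph f n st)
end

-- potential: total length of neighbour lists of not-yet-visited keys
def phi (file_graph : List (String × List String)) (r : PySem.Set String) : Nat :=
  (file_graph.map (fun kv => if kv.1 ∈ r then 0 else kv.2.length)).sum

lemma nbrs_nil (c : String) : nbrs [] c = [] := rfl

lemma nbrs_cons (k : String) (v : List String) (g : List (String × List String)) (c : String) :
    nbrs ((k, v) :: g) c = if k = c then v else nbrs g c := by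
  unfold nbrs
  rw [PySem.Dict.getD_eq_get?_getD, PySem.Dict.get?_mk_cons]
  by_cases h : k = c
  · simp [h]
  · simp [h, PySem.Dict.getD_eq_get?_getD]

lemma phi_cons (k : String) (v : List String) (g : List (String × List String)) (r : PySem.Set String) :
    phi ((k, v) :: g) r = (if k ∈ r then 0 else v.length) + phi g r := by
  simp [phi]

lemma phi_mono (g : List (String × List String)) (r r' : PySem.Set String)
    (h : ∀ x ∈ r, x ∈ r') : phi g r' ≤ phi g r := by
  unfold phi
  apply List.sum_le_sum
  intro kv _
  by_cases hk : kv.1 ∈ r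
  · simp [hk, h _ hk]
  · simp [hk]; split <;> omega

lemma mem_self_add (r : PySem.Set String) (c : String) : c ∈ r.add c := by
  rw [PySem.Set.mem_add]; exact Or.inr rfl

lemma mem_add_of_mem (r : PySem.Set String) (c x : String) (h : x ∈ r) : x ∈ r.add c := by
  rw [PySem.Set.mem_add]; exact Or.inl h

lemma phi_add (g : List (String × List String)) (c : String) (r : PySem.Set String)
    (hc : c ∉ r) : (nbrs g c).length + phi g (r.add c) ≤ phi g r := by
  induction g with
  | nil => simp [nbrs_nil, phi]
  | cons kv g ih =>
    obtain ⟨k, v⟩ := kv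
    rw [nbrs_cons, phi_cons, phi_cons]
    by_cases hk : k = c
    · subst hk
      rw [if_pos rfl, if_neg hc, if_pos (mem_self_add r k)]
      have := phi_mono g r (r.add k) (mem_add_of_mem r k)
      omega
    · rw [if_neg hk]
      have hmem : (k ∈ PySem.Set.add r c) ↔ (k ∈ r) := by
        simp [PySem.Set.mem_add, hk]
      rw [if_congr hmem rfl rfl]
      have := ih
      omega

lemma cost_le (g : List (String × List String)) :
    ∀ (f : Nat) (c : String) (st : PySem.Set String × PySem.Set String),
      costA g f c st + phi g (travA g f c st).1 ≤ 1 + phi g st.1 := by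
  intro f
  induction f with
  | zero => intro c st; simp [costA, travA]
  | succ f ih =>
    have ihL : ∀ (ns : List String) (st : PySem.Set String × PySem.Set String),
        costList g f ns st + phi g (travList g f ns st).1 ≤ ns.length + phi g st.1 := by
      intro ns
      induction ns with
      | nil => intro st; simp [costList, travList]
      | cons n ns ihn =>
        intro st
        have h1 := ih n st
        have h2 := ihn (travA g f n st)
        simp only [costList, travList, List.length_cons]
        omega
    intro c st
    by_cases hc : c ∈ st.1
    · simp [costA, travA, hc]
    · have h1 : costList g f (nbrs g c) (PySem.Set.add st.1 c, PySem.Set.add st.2 c)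
            + phi g (travList g f (nbrs g c) (PySem.Set.add st.1 c, PySem.Set.add st.2 c)).1
          ≤ (nbrs g c).length + phi g (PySem.Set.add st.1 c) :=
        ihL (nbrs g c) (PySem.Set.add st.1 c, PySem.Set.add st.2 c)
      have h2 := phi_add g c st.1 hc
      simp only [costA, travA, if_neg hc]
      omega

lemma loopB_nil (g : List (String × List String)) (M : Int) (f : Nat) (r : PySem.Set String) :
    loopB g M f [] r = r := by
  cases f <;> simp [loopB]

lemma bridge (g : List (String × List String)) (M : Int) :
    ∀ (f : Nat) (c : String) (d : Int) (st : PySem.Set String × PySem.Set String)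
      (ps : List (String × Int)) (fB : Nat), st.1 = st.2 → (M + 1 - d).toNat = f →
      loopB g M (costA g f c st + fB) ((c, d) :: ps) st.2
        = loopB g M fB ps (travA g f c st).2
      ∧ (travA g f c st).1 = (travA g f c st).2 := by
  intro f
  induction f with
  | zero =>
    intro c d st ps fB h hd
    have hdM : d > M := by omega
    constructor
    · have h1 : costA g 0 c st + fB = fB + 1 := by simp [costA]; omega
      rw [h1]
      simp [loopB, travA, hdM]
    · simp [travA, h]
  | succ f ih =>
    have ihL : ∀ (ns : List String) (d : Int) (st : PySem.Set String × PySem.Set String)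
        (ps : List (String × Int)) (fB : Nat), st.1 = st.2 → (M + 1 - d).toNat = f →
        loopB g M (costList g f ns st + fB) (ns.map (fun n => (n, d)) ++ ps) st.2
          = loopB g M fB ps (travList g f ns st).2
        ∧ (travList g f ns st).1 = (travList g f ns st).2 := by
      intro ns
      induction ns with
      | nil => intro d st ps fB h hd; exact ⟨by simp [costList, travList], by simp [travList, h]⟩
      | cons n ns ihn =>
        intro d st ps fB h hd
        have hA := ih n d st (ns.map (fun n => (n, d)) ++ ps)
          (costList g f ns (travA g f n st) + fB) h hd
        have hR := ihn d (travA g f n st) ps fB hA.2 hd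
        constructor
        · have h1 : costList g f (n :: ns) st + fB
              = costA g f n st + (costList g f ns (travA g f n st) + fB) := by
            simp [costList]; omega
          rw [h1]
          simp only [List.map_cons, List.cons_append]
          rw [hA.1]
          simpa [travList] using hR.1
        · simpa [travList] using hR.2
    intro c d st ps fB h hd
    have hdM : ¬ d > M := by omega
    by_cases hc : c ∈ st.1
    · have hc2 : c ∈ st.2 := h ▸ hc
      constructor
      · have h1 : costA g (f + 1) c st + fB = fB + 1 := by simp [costA, hc]; omega
        rw [h1]
        simp [loopB, travA, hc, hc2]
      · simp only [travA, if_pos hc]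
        exact h
    · have hc2 : c ∉ st.2 := h ▸ hc
      have hd' : (M + 1 - (d + 1)).toNat = f := by omega
      have hL := ihL (nbrs g c) (d + 1) (PySem.Set.add st.1 c, PySem.Set.add st.2 c) ps fB
        (by simp [h]) hd'
      have htr : travA g (f + 1) c st
          = travList g f (nbrs g c) (PySem.Set.add st.1 c, PySem.Set.add st.2 c) := by
        simp only [travA]
        rw [if_neg hc]
      constructor
      · have h1 : costA g (f + 1) c st + fB
            = (costList g f (nbrs g c) (PySem.Set.add st.1 c, PySem.Set.add st.2 c) + fB) + 1 := by
          simp [costA, hc]; omega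
        rw [h1]
        simp only [loopB]
        rw [if_neg (show ¬(d > M ∨ c ∈ st.2) by rintro (h' | h'); exact hdM h'; exact hc2 h')]
        rw [htr]
        exact hL.1
      · rw [htr]
        exact hL.2

-- ===== VERDICT (by name: the statement is the Claim_ definition above) =====
theorem get_related_files_spec : Claim_equal_get_related_files := by
  intro fp g M _
  unfold Spec_get_related_files get_related_files get_related_files_alt
  have hb : costA g (M + 1).toNat fp (PySem.Set.empty, PySem.Set.empty)
      + phi g (travA g (M + 1).toNat fp (PySem.Set.empty, PySem.Set.empty)).1
      ≤ 1 + phi g PySem.Set.empty :=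
    cost_le g (M + 1).toNat fp (PySem.Set.empty, PySem.Set.empty)
  have hphi : phi g PySem.Set.empty = (g.map (fun kv => kv.2.length)).sum := by
    simp [phi, PySem.Set.empty]
  obtain ⟨r, hr⟩ : ∃ r, 1 + phi g PySem.Set.empty
      = costA g (M + 1).toNat fp (PySem.Set.empty, PySem.Set.empty) + r :=
    ⟨1 + phi g PySem.Set.empty
      - costA g (M + 1).toNat fp (PySem.Set.empty, PySem.Set.empty), by omega⟩
  rw [← hphi, hr]
  have hbr := bridge g M (M + 1).toNat fp 0 (PySem.Set.empty, PySem.Set.empty) [] r rfl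
    (by norm_num)
  rw [hbr.1, loopB_nil]
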